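-- pv_equiv track=rewrite | github.com/Terax235/ofp-jack | Python/Task5/fibIndex.py | fib_index
-- ===== SOURCE A (Python) =====
-- def fib(n: int):
--     return n if n <= 1 else fib(n - 1) + fib(n - 2)
--
-- def fib_index(n: int):
--     i = 0
--     fibo = fib(0)
--     while fibo < n:
--         i += 1
--         fibo = fib(i)
--         if fibo == n:
--             break
--         if fibo > n:
--             i = -1
--             break
--     return i
-- ===== SOURCE B (Python) =====
-- def fib_index(n: int):
--     # Incremental Fibonacci pair instead of recomputing fib(i) by exponential recursion.
--     i = 0
--     a, b = 0, 1
--     while a < n: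
--         i += 1
--         a, b = b, a + b
--         if a == n:
--             break
--         if a > n:
--             i = -1
--             break
--     return i
-- ===== Notes on version B (the rewrite author's own statement) =====
-- stated objective: faster
-- what changed: Replaces the per-iteration exponential recursive fib(i) call with an incrementally maintained Fibonacci pair (a, b), so each loop step is O(1).
import Mathlib
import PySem

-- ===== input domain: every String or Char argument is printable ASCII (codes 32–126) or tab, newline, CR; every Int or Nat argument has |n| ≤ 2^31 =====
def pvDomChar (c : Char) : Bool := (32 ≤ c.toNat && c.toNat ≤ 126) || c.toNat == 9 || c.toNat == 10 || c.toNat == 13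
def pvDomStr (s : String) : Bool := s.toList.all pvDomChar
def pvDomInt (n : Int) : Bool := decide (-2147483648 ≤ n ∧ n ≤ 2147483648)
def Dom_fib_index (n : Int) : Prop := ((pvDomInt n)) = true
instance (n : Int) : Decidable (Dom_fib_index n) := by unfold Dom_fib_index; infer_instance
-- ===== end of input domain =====

-- B replaces A's exponential recursive fib(i) per loop step with an incrementally
-- maintained Fibonacci pair; objective: faster (asymptotic).
-- Both while loops run at most 47 iterations on Dom (fib 47 > 2^31), so fuel 100 is never exhausted there.

-- ===== PORT A =====
def fibA (n : Int) : Int :=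
  if n ≤ 1 then n else fibA (n - 1) + fibA (n - 2)
termination_by n.toNat
decreasing_by all_goals omega

def fibLoopA (fuel : Nat) (i : Int) (fibo : Int) (n : Int) : Int :=
  match fuel with
  | 0 => i
  | fuel + 1 =>
    if fibo < n then
      if fibA (i + 1) = n then i + 1
      else if fibA (i + 1) > n then -1
      else fibLoopA fuel (i + 1) (fibA (i + 1)) n
    else i

def fib_index (n : Int) : Int := fibLoopA 100 0 (fibA 0) n

-- ===== PORT B =====
def fibLoopB (fuel : Nat) (i : Int) (a : Int) (b : Int) (n : Int) : Int :=
  match fuel with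
  | 0 => i
  | fuel + 1 =>
    if a < n then
      if b = n then i + 1
      else if b > n then -1
      else fibLoopB fuel (i + 1) b (a + b) n
    else i

def fib_index_alt (n : Int) : Int := fibLoopB 100 0 0 1 n

-- ===== PRECONDITION & SPEC =====
def Spec_fib_index (n : Int) (out : Int) : Prop := out = fib_index_alt n
instance (n : Int) (out : Int) : Decidable (Spec_fib_index n out) := by unfold Spec_fib_index; infer_instance

-- ===== CLAIM (what is proved, stated in full; the proofs are below) =====
def Claim_equal_fib_index : Prop := ∀ (n : Int), Dom_fib_index n → Spec_fib_index n (fib_index n)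

-- ===== LEMMAS AND PROOFS =====

theorem fibA_step (i : Int) (hi : 0 ≤ i) : fibA (i + 1 + 1) = fibA (i + 1) + fibA i := by
  rw [fibA]
  rw [if_neg (by omega)]
  have h1 : i + 1 + 1 - 1 = i + 1 := by ring
  have h2 : i + 1 + 1 - 2 = i := by ring
  rw [h1, h2]

theorem loop_eq (fuel : Nat) : ∀ (i n : Int), 0 ≤ i →
    fibLoopA fuel i (fibA i) n = fibLoopB fuel i (fibA i) (fibA (i + 1)) n := by
  induction fuel with
  | zero => intro i n _; rfl
  | succ fuel ih =>
    intro i n hi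
    simp only [fibLoopA, fibLoopB]
    by_cases h1 : fibA i < n
    · simp only [if_pos h1]
      by_cases h2 : fibA (i + 1) = n
      · simp [h2]
      · simp only [if_neg h2]
        by_cases h3 : fibA (i + 1) > n
        · simp [h3]
        · simp only [if_neg h3]
          have hb : fibA i + fibA (i + 1) = fibA (i + 1 + 1) := by
            rw [fibA_step i hi]; ring
          rw [hb]
          exact ih (i + 1) n (by omega)
    · simp [h1]

-- ===== VERDICT (by name: the statement is the Claim_ definition above) =====
theorem fib_index_spec : Claim_equal_fib_index := by
  intro n _
  unfold Spec_fib_index fib_index fib_index_alt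
  have h0 : fibA 0 = 0 := by rw [fibA]; norm_num
  have h1 : fibA 1 = 1 := by rw [fibA]; norm_num
  have := loop_eq 100 0 n (by norm_num)
  simpa [h0, h1] using this
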